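-- pv_equiv track=rewrite | github.com/youth4ever/orion | Project EULER/pb191 Prize Strings.py | p271
-- ===== SOURCE A (Python) =====
-- def p271(N):
--     prize = [[1,0],[0,1],[0,0]]
--     while len(prize[0]) < N+1:
--         (a,b,c) = prize
--         d = []
--         for i in range(len(a)):
--             d.append(a[i]+b[i]+c[i])
--         d = d + [0]
--         e = [0] + a
--         f = [0] + b
--         prize = [d,e,f]
--     s = 0
--     for i in range(N+1):
--         s += (N+1-i)*(prize[0][i]+prize[1][i]+prize[2][i])
--     return s
-- ===== SOURCE B (Python) =====
-- def p271(N):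
--     # Instead of growing three coefficient lists (O(N^2) work), track only the
--     # zeroth and first moments (sum and index-weighted sum) of each list: the
--     # final weighted sum equals (N+1)*S0 - S1, giving a six-scalar linear DP.
--     if N < 0:
--         return 0
--     s0a, s1a, s0b, s1b, s0c, s1c = 1, 0, 1, 1, 0, 0
--     for _ in range(N - 1):
--         s0a, s1a, s0b, s1b, s0c, s1c = (
--             s0a + s0b + s0c, s1a + s1b + s1c,
--             s0a, s1a + s0a,
--             s0b, s1b + s0b)
--     return (N + 1) * (s0a + s0b + s0c) - (s1a + s1b + s1c)
-- ===== Notes on version B (the rewrite author's own statement) =====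
-- stated objective: faster
-- what changed: Replaces the three O(N)-length coefficient lists rebuilt each iteration by just their zeroth and first moments (sum and index-weighted sum), a six-scalar linear recurrence, since the final weighted sum equals (N+1)*S0 - S1.
import Mathlib
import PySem

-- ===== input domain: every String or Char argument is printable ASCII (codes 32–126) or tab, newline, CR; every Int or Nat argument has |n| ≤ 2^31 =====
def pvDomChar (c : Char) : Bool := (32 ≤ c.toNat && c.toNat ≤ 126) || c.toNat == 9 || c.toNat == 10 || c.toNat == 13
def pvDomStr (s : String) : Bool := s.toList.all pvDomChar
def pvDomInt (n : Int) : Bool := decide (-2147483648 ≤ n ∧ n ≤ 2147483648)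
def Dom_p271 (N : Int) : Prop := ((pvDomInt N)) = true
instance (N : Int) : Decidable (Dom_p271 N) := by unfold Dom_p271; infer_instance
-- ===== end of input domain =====

-- B replaces A's three O(N)-length coefficient lists by their zeroth and first
-- moments, a six-scalar linear recurrence (objective: faster, O(N) vs O(N^2)).

-- ===== PORT A =====
-- one body of A's while-loop: d = [a[i]+b[i]+c[i] for i in range(len(a))] + [0]
-- (indices are always in range in every reachable state — the three lists have
-- equal lengths throughout — so the default of pyGetD is never used)
def p271D (a b c : List Int) : List Int :=
  ((PySem.List.pyRange 0 a.length 1).foldl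
    (fun d i => d ++ [PySem.List.pyGetD a i 0 + PySem.List.pyGetD b i 0 + PySem.List.pyGetD c i 0]) []) ++ [0]

theorem p271D_length (a b c : List Int) : (p271D a b c).length = a.length + 1 := by
  rw [p271D, PySem.List.foldl_append_singleton_eq_map]
  simp

-- the while-loop: runs while len(prize[0]) < N+1, each pass grows the lists by one
def p271Go (N : Int) (a b c : List Int) : List Int × List Int × List Int :=
  if _h : (a.length : Int) < N + 1 then
    p271Go N (p271D a b c) (0 :: a) (0 :: b)
  else (a, b, c)
termination_by (N + 1 - a.length).toNat
decreasing_by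
  rw [p271D_length]
  omega

def p271 (N : Int) : Int :=
  let p := p271Go N [1, 0] [0, 1] [0, 0]
  (PySem.List.pyRange 0 (N + 1) 1).foldl
    (fun s i => s + (N + 1 - i) *
      (PySem.List.pyGetD p.1 i 0 + PySem.List.pyGetD p.2.1 i 0 + PySem.List.pyGetD p.2.2 i 0)) 0

-- ===== PORT B =====
def p271_alt (N : Int) : Int :=
  if N < 0 then 0
  else
    let t := (List.range (N - 1).toNat).foldl
      (fun (t : Int × Int × Int × Int × Int × Int) _ =>
        match t with
        | (s0a, s1a, s0b, s1b, s0c, s1c) =>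
          (s0a + s0b + s0c, s1a + s1b + s1c, s0a, s1a + s0a, s0b, s1b + s0b))
      (1, 0, 1, 1, 0, 0)
    (N + 1) * (t.1 + t.2.2.1 + t.2.2.2.2.1) - (t.2.1 + t.2.2.2.1 + t.2.2.2.2.2)

-- ===== PRECONDITION & SPEC =====
def Spec_p271 (N : Int) (out : Int) : Prop := out = p271_alt N
instance (N : Int) (out : Int) : Decidable (Spec_p271 N out) := by unfold Spec_p271; infer_instance

-- ===== CLAIM (what is proved, stated in full; the proofs are below) =====
def Claim_equal_p271 : Prop := ∀ (N : Int), Dom_p271 N → Spec_p271 N (p271 N)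

-- ===== LEMMAS AND PROOFS =====

-- zeroth and first moments of a list: m0 x = Σ x[i], m1 x = Σ i * x[i]
def m0 (x : List Int) : Int := x.sum
def m1 : List Int → Int
  | [] => 0
  | _ :: xs => m0 xs + m1 xs

-- B's step function and its iteration
def pF (t : Int × Int × Int × Int × Int × Int) : Int × Int × Int × Int × Int × Int :=
  (t.1 + t.2.2.1 + t.2.2.2.2.1, t.2.1 + t.2.2.2.1 + t.2.2.2.2.2, t.1, t.2.1 + t.1, t.2.2.1, t.2.2.2.1 + t.2.2.1)

def pFiter : Nat → (Int × Int × Int × Int × Int × Int) → (Int × Int × Int × Int × Int × Int)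
  | 0, t => t
  | k + 1, t => pFiter k (pF t)

def pM (a b c : List Int) : Int × Int × Int × Int × Int × Int :=
  (m0 a, m1 a, m0 b, m1 b, m0 c, m1 c)

theorem foldl_eq_pFiter (k : Nat) (t : Int × Int × Int × Int × Int × Int) :
    (List.range k).foldl
      (fun (t : Int × Int × Int × Int × Int × Int) (_ : Nat) =>
        (t.1 + t.2.2.1 + t.2.2.2.2.1, t.2.1 + t.2.2.2.1 + t.2.2.2.2.2, t.1, t.2.1 + t.1,
          t.2.2.1, t.2.2.2.1 + t.2.2.1)) t = pFiter k t := by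
  induction k generalizing t with
  | zero => simp [pFiter]
  | succ m ih =>
    rw [List.range_succ_eq_map]
    simp only [List.foldl_cons, List.foldl_map]
    exact ih (pF t)

theorem sum_append_zero (l : List Int) : m0 (l ++ [0]) = m0 l := by
  simp [m0]

theorem m1_append_zero (l : List Int) : m1 (l ++ [0]) = m1 l := by
  induction l with
  | nil => simp [m1, m0]
  | cons x xs ih => simp [m1, ih, sum_append_zero]

-- the map form of p271D, and its cons equation
def pDm (a b c : List Int) : List Int :=
  (List.range a.length).map (fun i => a.getD i 0 + b.getD i 0 + c.getD i 0)

theorem p271D_eq_map (a b c : List Int) : p271D a b c = pDm a b c ++ [0] := by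
  simp only [p271D, PySem.List.foldl_append_singleton_eq_map, List.nil_append, pDm]
  rw [PySem.List.pyRange_zero_nat]
  simp [List.map_map, Function.comp, PySem.List.pyGetD_natCast]

theorem pDm_cons (x y z : Int) (xs ys zs : List Int) :
    pDm (x :: xs) (y :: ys) (z :: zs) = (x + y + z) :: pDm xs ys zs := by
  simp only [pDm, List.length_cons, List.range_succ_eq_map, List.map_cons, List.map_map]
  rfl

theorem m0_pDm : ∀ a b c : List Int, b.length = a.length → c.length = a.length →
    m0 (pDm a b c) = m0 a + m0 b + m0 c := by
  intro a
  induction a with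
  | nil =>
    intro b c hb hc
    rw [List.length_eq_zero_iff.mp hb, List.length_eq_zero_iff.mp hc]
    simp [pDm, m0]
  | cons x xs ih =>
    intro b c hb hc
    match b, c with
    | y :: ys, z :: zs =>
      simp only [List.length_cons, Nat.add_right_cancel_iff] at hb hc
      rw [pDm_cons]
      simp only [m0, List.sum_cons] at *
      rw [ih ys zs hb hc]
      ring

theorem m1_pDm : ∀ a b c : List Int, b.length = a.length → c.length = a.length →
    m1 (pDm a b c) = m1 a + m1 b + m1 c := by
  intro a
  induction a with
  | nil =>
    intro b c hb hc
    rw [List.length_eq_zero_iff.mp hb, List.length_eq_zero_iff.mp hc]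
    simp [pDm, m1]
  | cons x xs ih =>
    intro b c hb hc
    match b, c with
    | y :: ys, z :: zs =>
      simp only [List.length_cons, Nat.add_right_cancel_iff] at hb hc
      rw [pDm_cons]
      simp only [m1]
      rw [ih ys zs hb hc, m0_pDm xs ys zs hb hc]
      ring

theorem pM_step (a b c : List Int) (hb : b.length = a.length) (hc : c.length = a.length) :
    pM (p271D a b c) (0 :: a) (0 :: b) = pF (pM a b c) := by
  simp only [pM, pF, p271D_eq_map, Prod.mk.injEq]
  refine ⟨?_, ?_, ?_, ?_, ?_, ?_⟩
  · rw [sum_append_zero, m0_pDm a b c hb hc]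
  · rw [m1_append_zero, m1_pDm a b c hb hc]
  · simp [m0]
  · simp [m1]; ring
  · simp [m0]
  · simp [m1]; ring

theorem p271Go_spec (k : Nat) : ∀ (N : Int) (a b c : List Int),
    (N + 1 - (a.length : Int)).toNat = k → b.length = a.length → c.length = a.length →
    pM (p271Go N a b c).1 (p271Go N a b c).2.1 (p271Go N a b c).2.2 = pFiter k (pM a b c) ∧
    (p271Go N a b c).1.length = a.length + k ∧
    (p271Go N a b c).2.1.length = a.length + k ∧
    (p271Go N a b c).2.2.length = a.length + k := by
  induction k with
  | zero =>
    intro N a b c hk hb hc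
    rw [p271Go]
    have : ¬ ((a.length : Int) < N + 1) := by omega
    rw [dif_neg this]
    exact ⟨rfl, by simp, by simp [hb], by simp [hc]⟩
  | succ m ih =>
    intro N a b c hk hb hc
    rw [p271Go]
    have hlt : (a.length : Int) < N + 1 := by omega
    simp only [hlt, dif_pos]
    have hd : (p271D a b c).length = a.length + 1 := p271D_length a b c
    have h1 : (N + 1 - ((p271D a b c).length : Int)).toNat = m := by rw [hd]; push_cast; omega
    have h2 : (0 :: a).length = (p271D a b c).length := by simp [hd]
    have h3 : (0 :: b).length = (p271D a b c).length := by simp [hd, hb]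
    obtain ⟨hM, hl1, hl2, hl3⟩ := ih N (p271D a b c) (0 :: a) (0 :: b) h1 h2 h3
    refine ⟨?_, by omega, by omega, by omega⟩
    rw [hM, pM_step a b c hb hc]
    rfl

-- weighted sum: Σ_{k<n} (n-k)*x[k] = n*m0 x - m1 x, provided x.length ≤ n+1
theorem weighted_sum (x : List Int) : ∀ (n : Nat), x.length ≤ n + 1 →
    ((List.range n).map (fun k => ((n : Int) - k) * x.getD k 0)).sum = n * m0 x - m1 x := by
  induction x with
  | nil =>
    intro n _
    simp [m0, m1]
  | cons v xs ih =>
    intro n hn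
    match n with
    | 0 =>
      simp only [List.length_cons] at hn
      have : xs = [] := List.length_eq_zero_iff.mp (by omega)
      subst this
      simp [m0, m1]
    | m + 1 =>
      rw [List.range_succ_eq_map]
      simp only [List.map_cons, List.map_map, List.sum_cons]
      have hmap : (List.range m).map ((fun k => (((m + 1 : Nat) : Int) - k) * (v :: xs).getD k 0) ∘ Nat.succ)
          = (List.range m).map (fun k => ((m : Int) - k) * xs.getD k 0) := by
        apply List.map_congr_left
        intro k _
        simp only [Function.comp, List.getD_cons_succ]
        congr 1
        push_cast
        ring
      rw [hmap, ih m (by simpa using Nat.lt_succ_iff.mp (Nat.lt_of_lt_of_le (Nat.lt_succ_self _) hn))]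
      simp only [m0, m1, List.sum_cons, List.getD_cons_zero]
      push_cast
      ring

-- (pDm a b c).getD k 0 is the per-index column sum used by A's final loop
theorem getD_pDm (a b c : List Int) (hb : b.length = a.length) (hc : c.length = a.length) (k : Nat) :
    (pDm a b c).getD k 0 = a.getD k 0 + b.getD k 0 + c.getD k 0 := by
  by_cases h : k < a.length
  · simp [pDm, List.getD_eq_getElem?_getD, h]
  · rw [Nat.not_lt] at h
    rw [List.getD_eq_default _ _ (by simp [pDm]; omega),
        List.getD_eq_default _ _ (by omega),
        List.getD_eq_default _ _ (by omega),
        List.getD_eq_default _ _ (by omega)]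
    simp

-- the final summation of A in terms of the moments of the three final lists
theorem final_sum (a b c : List Int) (N : Int) (hN : 0 ≤ N)
    (ha : (a.length : Int) ≤ N + 2) (hb : b.length = a.length) (hc : c.length = a.length) :
    (PySem.List.pyRange 0 (N + 1) 1).foldl
      (fun s i => s + (N + 1 - i) *
        (PySem.List.pyGetD a i 0 + PySem.List.pyGetD b i 0 + PySem.List.pyGetD c i 0)) 0
    = (N + 1) * (m0 a + m0 b + m0 c) - (m1 a + m1 b + m1 c) := by
  rw [PySem.List.foldl_add]
  have hr : PySem.List.pyRange 0 (N + 1) 1 = (List.range (N + 1).toNat).map (fun k : Nat => (k : Int)) := by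
    rw [PySem.List.pyRange_one]
    simp
  rw [hr, List.map_map]
  have hn : (((N + 1).toNat : Nat) : Int) = N + 1 := by omega
  have hmap : (List.range (N + 1).toNat).map
        ((fun i => (N + 1 - i) * (PySem.List.pyGetD a i 0 + PySem.List.pyGetD b i 0 + PySem.List.pyGetD c i 0)) ∘ (fun k : Nat => (k : Int)))
      = (List.range (N + 1).toNat).map (fun k : Nat => ((((N + 1).toNat : Nat) : Int) - k) * (pDm a b c).getD k 0) := by
    apply List.map_congr_left
    intro k _
    simp only [Function.comp, PySem.List.pyGetD_natCast, getD_pDm a b c hb hc k, hn]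
  rw [hmap, weighted_sum (pDm a b c) (N + 1).toNat (by simp [pDm]; omega)]
  rw [m0_pDm a b c hb hc, m1_pDm a b c hb hc, hn]
  ring

-- ===== VERDICT (by name: the statement is the Claim_ definition above) =====
theorem p271_spec : Claim_equal_p271 := by
  unfold Claim_equal_p271
  intro N _
  unfold Spec_p271
  by_cases hN : N < 0
  · simp only [p271, p271_alt, if_pos hN]
    rw [PySem.List.pyRange_one_eq_nil (by omega)]
    rfl
  · replace hN : 0 ≤ N := by omega
    simp only [p271, p271_alt, if_neg (not_lt.mpr hN)]
    have hklen : (N + 1 - ((([1, 0] : List Int).length) : Int)).toNat = (N - 1).toNat := by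
      simp only [List.length_cons, List.length_nil]
      omega
    obtain ⟨hM, hl1, hl2, hl3⟩ := p271Go_spec (N - 1).toNat N [1, 0] [0, 1] [0, 0]
      hklen (by simp) (by simp)
    have ha' : (((p271Go N [1, 0] [0, 1] [0, 0]).1.length) : Int) ≤ N + 2 := by
      rw [hl1]
      simp only [List.length_cons, List.length_nil]
      omega
    have hb' : (p271Go N [1, 0] [0, 1] [0, 0]).2.1.length = (p271Go N [1, 0] [0, 1] [0, 0]).1.length := by
      rw [hl2, hl1]
    have hc' : (p271Go N [1, 0] [0, 1] [0, 0]).2.2.length = (p271Go N [1, 0] [0, 1] [0, 0]).1.length := by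
      rw [hl3, hl1]
    rw [final_sum _ _ _ N hN ha' hb' hc']
    rw [foldl_eq_pFiter]
    have hinit : pM [1, 0] [0, 1] [0, 0] = ((1 : Int), (0 : Int), (1 : Int), (1 : Int), (0 : Int), (0 : Int)) := by
      simp [pM, m0, m1]
    rw [hinit] at hM
    rw [← hM]
    simp only [pM]
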